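-- pv_equiv track=rewrite | github.com/gmangin/SortWithTrees | sortWithTrees.py | sortWithTrees
-- ===== SOURCE A (Python) =====
-- def sortWithTrees(a):
--     start = 0
--     toOrder = False
--     for i in range(len(a)):
--         if a[i] != -1 and not toOrder:
--             start = i
--             toOrder = True
--         elif a[i] == -1 and toOrder:
--             a[start:i] = sorted(a[start:i])
--             toOrder = False
--         elif i == (len(a) - 1) and toOrder:
--             a[start:] = sorted(a[start:])
--     return a
-- ===== SOURCE B (Python) =====
-- def sortWithTrees(a):
--     # Decorate-sort-refill: tag every non-(-1) value with its segment number
--     # (count of -1 separators before it), do ONE global sort of the tagged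
--     # pairs -- lexicographic tuple order keeps segments together and sorts
--     # values within each segment -- then write the values back into the
--     # non-(-1) positions in place.
--     keyed = []
--     seg = 0
--     for x in a:
--         if x == -1:
--             seg += 1
--         else:
--             keyed.append((seg, x))
--     keyed.sort()
--     k = 0
--     for i in range(len(a)):
--         if a[i] != -1:
--             a[i] = keyed[k][1]
--             k += 1
--     return a
-- ===== Notes on version B (the rewrite author's own statement) =====
-- stated objective: alternative
-- what changed: Replaces A's per-run slice sorting (a stateful scan that sorts each maximal non-(-1) slice in place) by a decorate-sort-undecorate pass: tag each non-(-1) value with its segment number, perform ONE global lexicographic sort of the tagged pairs, and write the values back into the non-(-1) positions.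
import Mathlib
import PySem

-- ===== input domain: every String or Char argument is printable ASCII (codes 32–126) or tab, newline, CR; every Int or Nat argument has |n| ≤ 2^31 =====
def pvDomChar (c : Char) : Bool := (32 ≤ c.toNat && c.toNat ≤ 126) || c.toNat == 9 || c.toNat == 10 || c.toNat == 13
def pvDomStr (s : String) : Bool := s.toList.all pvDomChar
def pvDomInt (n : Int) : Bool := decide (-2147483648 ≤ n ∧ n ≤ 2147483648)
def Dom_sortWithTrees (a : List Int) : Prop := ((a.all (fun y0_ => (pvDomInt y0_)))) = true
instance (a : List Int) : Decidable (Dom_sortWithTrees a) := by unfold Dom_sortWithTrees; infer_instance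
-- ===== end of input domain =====

-- B replaces A's per-run slice sorting by a decorate-sort-undecorate pass (tag values with
-- their segment number, one global lexicographic sort, write back). Both Pythons mutate `a`
-- in place identically; the equivalence proved here is about the return value.

-- ===== PORT A =====
-- A's loop body; loop indices i are always < ls.length, and 0 ≤ start ≤ i, so
-- a[i] is ported as ls.getD i 0 and the slices a[start:i] / a[start:] as
-- (ls.drop start).take (i - start) / ls.drop start (exact for in-range non-negative indices).
def stepA (st : List Int × Nat × Bool) (i : Nat) : List Int × Nat × Bool :=
  let ls := st.1
  let start := st.2.1
  let toOrder := st.2.2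
  if ls.getD i 0 ≠ -1 ∧ toOrder = false then
    (ls, i, true)
  else if ls.getD i 0 = -1 ∧ toOrder = true then
    (ls.take start ++ PySem.List.sorted ((ls.drop start).take (i - start)) (fun z => z) false ++ ls.drop i,
     start, false)
  else if i = ls.length - 1 ∧ toOrder = true then
    (ls.take start ++ PySem.List.sorted (ls.drop start) (fun z => z) false, start, toOrder)
  else st

def sortWithTrees (a : List Int) : List Int :=
  ((List.range a.length).foldl stepA (a, 0, false)).1

-- ===== PORT B =====
-- Source B's first loop: build the (segment, value) pair list with a running segment counter.
def keyedLoop (st : List (Int × Int) × Int) (x : Int) : List (Int × Int) × Int :=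
  if x = -1 then (st.1, st.2 + 1) else (st.1 ++ [(st.2, x)], st.2)

-- Source B's second loop: write the sorted values back into the non-(-1) positions, in order.
-- The `[]` fallback is unreachable (keyed holds exactly one pair per non-(-1) element of a)
-- and merely totalizes the Python indexing keyed[k].
def refill : List Int → List (Int × Int) → List Int
  | [], _ => []
  | x :: xs, ks =>
    if x = -1 then x :: refill xs ks
    else match ks with
      | [] => x :: refill xs []
      | k :: ks' => k.2 :: refill xs ks'

-- keyed.sort() on (int, int) pairs is Python's lexicographic tuple sort = sorted2 fst snd.
def sortWithTrees_alt (a : List Int) : List Int :=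
  refill a (PySem.List.sorted2 (a.foldl keyedLoop ([], 0)).1 Prod.fst Prod.snd false)

-- ===== PRECONDITION & SPEC =====
def Spec_sortWithTrees (a : List Int) (out : List Int) : Prop := out = sortWithTrees_alt a
instance (a : List Int) (out : List Int) : Decidable (Spec_sortWithTrees a out) := by unfold Spec_sortWithTrees; infer_instance

-- ===== CLAIM (what is proved, stated in full; the proofs are below) =====
def Claim_equal_sortWithTrees : Prop := ∀ (a : List Int), Dom_sortWithTrees a → Spec_sortWithTrees a (sortWithTrees a)

-- ===== LEMMAS AND PROOFS =====

-- Common reference point of both proofs: the per-run sorted list, by recursion on runs.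
def sortRuns : List Int → List Int
  | [] => []
  | x :: xs =>
    if x = -1 then (-1) :: sortRuns xs
    else
      PySem.List.sorted ((x :: xs).takeWhile (· != -1)) (fun z => z) false
        ++ sortRuns ((x :: xs).dropWhile (· != -1))
termination_by l => l.length
decreasing_by
  · simp
  · rename_i h
    have hx : (x != -1) = true := by simpa using h
    simp only [List.dropWhile_cons, hx, if_true]
    exact Nat.lt_succ_of_le (List.length_dropWhile_le _ _)

lemma sortRuns_nil : sortRuns [] = [] := by rw [sortRuns.eq_def]

lemma sortRuns_cons_neg (v : List Int) : sortRuns ((-1) :: v) = (-1) :: sortRuns v := by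
  rw [sortRuns.eq_def]; simp

lemma sortRuns_cons (x : Int) (xs : List Int) (h : ¬ x = -1) :
    sortRuns (x :: xs) =
      PySem.List.sorted ((x :: xs).takeWhile (· != -1)) (fun z => z) false
        ++ sortRuns ((x :: xs).dropWhile (· != -1)) := by
  rw [sortRuns.eq_def]; simp [h]

lemma takeWhile_run (r v : List Int) (h : ∀ x ∈ r, x ≠ -1) :
    List.takeWhile (· != -1) (r ++ (-1) :: v) = r := by
  induction r with
  | nil => simp
  | cons y ys ih =>
    have hy : (y != -1) = true := by simpa using h y (by simp)
    simp only [List.cons_append, List.takeWhile_cons, hy, if_true]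
    rw [ih (fun x hx => h x (by simp [hx]))]

lemma dropWhile_run (r v : List Int) (h : ∀ x ∈ r, x ≠ -1) :
    List.dropWhile (· != -1) (r ++ (-1) :: v) = (-1) :: v := by
  induction r with
  | nil => simp
  | cons y ys ih =>
    have hy : (y != -1) = true := by simpa using h y (by simp)
    simp only [List.cons_append, List.dropWhile_cons, hy, if_true]
    exact ih (fun x hx => h x (by simp [hx]))

lemma sortRuns_run_cons (r v : List Int) (h : ∀ x ∈ r, x ≠ -1) :
    sortRuns (r ++ (-1) :: v) =
      PySem.List.sorted r (fun z => z) false ++ (-1) :: sortRuns v := by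
  cases r with
  | nil => simp [sortRuns_cons_neg, PySem.List.sorted]
  | cons y ys =>
    have hy : ¬ y = -1 := h y (by simp)
    rw [List.cons_append, sortRuns_cons _ _ hy]
    rw [show (y :: (ys ++ (-1) :: v)) = (y :: ys) ++ (-1) :: v from rfl]
    rw [takeWhile_run _ _ h, dropWhile_run _ _ h, sortRuns_cons_neg]

lemma sortRuns_run (r : List Int) (h : ∀ x ∈ r, x ≠ -1) :
    sortRuns r = PySem.List.sorted r (fun z => z) false := by
  cases r with
  | nil => simp [sortRuns_nil, PySem.List.sorted]
  | cons y ys =>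
    have hy : ¬ y = -1 := h y (by simp)
    rw [sortRuns_cons _ _ hy]
    have ht : List.takeWhile (· != -1) (y :: ys) = y :: ys := by
      apply List.takeWhile_eq_self_iff.mpr
      intro y hy
      simpa using h y hy
    have hd : List.dropWhile (· != -1) (y :: ys) = [] := by
      apply List.dropWhile_eq_nil_iff.mpr
      intro y hy
      simpa using h y hy
    rw [ht, hd, sortRuns_nil, List.append_nil]

-- ---------- A's loop computes sortRuns ----------

lemma loop_inv (k : Nat) : ∀ (i start : Nat) (ls : List Int) (tog : Bool),
    i + k = ls.length →
    (tog = true → start ≤ i ∧ (∀ j, start ≤ j → j < i → ls.getD j 0 ≠ -1) ∧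
      (start + 1 = ls.length ∨ i < ls.length)) →
    ((List.range' i k).foldl stepA (ls, start, tog)).1 =
      (if tog then ls.take start ++ sortRuns (ls.drop start)
       else ls.take i ++ sortRuns (ls.drop i)) := by
  induction k with
  | zero =>
    intro i start ls tog hlen htog
    have hi : i = ls.length := by omega
    simp only [List.range'_zero, List.foldl_nil]
    cases tog with
    | false => simp [hi, sortRuns_nil]
    | true =>
      obtain ⟨hsi, hrun, hor⟩ := htog rfl
      have hs1 : start + 1 = ls.length := by omega
      have hslt : start < ls.length := by omega
      have hdrop : ls.drop start = [ls[start]] := by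
        rw [List.drop_eq_getElem_cons hslt, List.drop_eq_nil_of_le (by omega)]
      have hx : ls[start] ≠ -1 := by
        have := hrun start le_rfl (by omega)
        rwa [List.getD_eq_getElem _ _ hslt] at this
      simp only [if_true]
      rw [hdrop, sortRuns_run _ (by simpa using hx),
        PySem.List.sorted_eq_self_of_pairwise [ls[start]] (fun z => z) (by simp),
        ← hdrop, List.take_append_drop]
  | succ k ih =>
    intro i start ls tog hlen htog
    have hilt : i < ls.length := by omega
    have hgd : ls.getD i 0 = ls[i] := List.getD_eq_getElem _ _ hilt
    rw [List.range'_succ, List.foldl_cons]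
    cases tog with
    | false =>
      by_cases hx : ls[i] = -1
      · -- a[i] == -1, not toOrder: no branch fires
        have hstep : stepA (ls, start, false) i = (ls, start, false) := by
          simp [stepA, List.getElem?_eq_getElem hilt, hx]
        rw [hstep, ih (i + 1) start ls false (by omega) (by simp)]
        have hdrop : ls.drop i = (-1) :: ls.drop (i + 1) := by
          rw [List.drop_eq_getElem_cons hilt, hx]
        have htake : ls.take (i + 1) = ls.take i ++ [(-1 : Int)] := by
          rw [List.take_add_one, List.getElem?_eq_getElem hilt, hx]; rfl
        simp [hdrop, htake, sortRuns_cons_neg]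
      · -- a[i] != -1, not toOrder: open a run at i
        have hstep : stepA (ls, start, false) i = (ls, i, true) := by
          simp only [stepA]
          rw [if_pos ⟨by rw [hgd]; exact hx, by trivial⟩]
        have hrun' : ∀ j, i ≤ j → j < i + 1 → ls.getD j 0 ≠ -1 := by
          intro j hj1 hj2
          have hji : j = i := by omega
          rw [hji, hgd]; exact hx
        rw [hstep, ih (i + 1) i ls true (by omega)
          (fun _ => ⟨Nat.le_succ i, hrun', by omega⟩)]
        simp
    | true =>
      obtain ⟨hsi, hrun, -⟩ := htog rfl
      by_cases hx : ls[i] = -1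
      · -- a[i] == -1 and toOrder: sort the run a[start:i]
        set r : List Int := (ls.drop start).take (i - start) with hr
        set sr : List Int := PySem.List.sorted r (fun z => z) false with hsr
        set ls' : List Int := ls.take start ++ sr ++ ls.drop i with hls'
        have hrall : ∀ y ∈ r, y ≠ -1 := by
          intro y hy
          rw [List.mem_iff_getElem] at hy
          obtain ⟨t, ht, hty⟩ := hy
          have ht' : t < i - start := by
            simp only [hr, List.length_take, List.length_drop] at ht; omega
          have hlt : start + t < ls.length := by omega
          have : y = ls[start + t] := by
            rw [← hty]; simp [hr, List.getElem_take, List.getElem_drop]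
          rw [this, ← List.getD_eq_getElem _ 0 hlt]
          exact hrun (start + t) (by omega) (by omega)
        have hlr : sr.length = i - start := by
          rw [hsr, PySem.List.length_sorted, hr]
          simp only [List.length_take, List.length_drop]; omega
        have hpre : (ls.take start ++ sr).length = i := by
          simp only [List.length_append, List.length_take]; omega
        have hstep : stepA (ls, start, true) i = (ls', start, false) := by
          simp only [stepA]
          rw [if_neg (by simp), if_pos ⟨by rw [hgd]; exact hx, by trivial⟩]
        have hdropi : ls.drop i = (-1) :: ls.drop (i + 1) := by
          rw [List.drop_eq_getElem_cons hilt, hx]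
        have hlen' : ls'.length = ls.length := by
          simp only [hls', List.length_append, List.length_take, List.length_drop]
          omega
        rw [hstep, ih (i + 1) start ls' false (by omega) (by simp)]
        have hassoc : ls' = (ls.take start ++ sr) ++ ls.drop i := by
          simp [hls', List.append_assoc]
        have htake' : ls'.take (i + 1) = (ls.take start ++ sr) ++ [(-1 : Int)] := by
          conv_lhs => rw [hassoc, show i + 1 = (ls.take start ++ sr).length + 1 from by rw [hpre],
            List.take_length_add_append, hdropi]
          rfl
        have hdrop' : ls'.drop (i + 1) = ls.drop (i + 1) := by
          conv_lhs => rw [hassoc, show i + 1 = (ls.take start ++ sr).length + 1 from by rw [hpre],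
            List.drop_length_add_append, hdropi]
          rfl
        have hsplit : ls.drop start = r ++ (-1) :: ls.drop (i + 1) := by
          conv_lhs => rw [← List.take_append_drop (i - start) (ls.drop start)]
          rw [List.drop_drop, show start + (i - start) = i by omega, hdropi]
        rw [htake', hdrop', hsplit, sortRuns_run_cons _ _ hrall, ← hsr]
        simp [List.append_assoc]
      · by_cases hend : i + 1 = ls.length
        · -- last index with an open run: sort a[start:]
          have hk : k = 0 := by omega
          subst hk
          have hstep : stepA (ls, start, true) i =
              (ls.take start ++ PySem.List.sorted (ls.drop start) (fun z => z) false,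
               start, true) := by
            simp only [stepA]
            rw [if_neg (by simp), if_neg (by rintro ⟨h1, -⟩; rw [hgd] at h1; exact hx h1),
              if_pos ⟨by omega, by trivial⟩]
          rw [hstep]
          simp only [List.range'_zero, List.foldl_nil, if_true]
          have hall : ∀ y ∈ ls.drop start, y ≠ -1 := by
            intro y hy
            rw [List.mem_iff_getElem] at hy
            obtain ⟨t, ht, hty⟩ := hy
            have hlt : start + t < ls.length := by
              simp only [List.length_drop] at ht; omega
            have hy' : y = ls[start + t] := by rw [← hty]; simp [List.getElem_drop]
            rcases Nat.lt_or_ge (start + t) i with h | h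
            · rw [hy', ← List.getD_eq_getElem _ 0 hlt]
              exact hrun (start + t) (by omega) h
            · have hsti : start + t = i := by omega
              rw [hy', ← List.getD_eq_getElem _ 0 hlt, hsti, hgd]; exact hx
          rw [sortRuns_run _ hall]
        · -- run continues
          have hstep : stepA (ls, start, true) i = (ls, start, true) := by
            simp only [stepA]
            rw [if_neg (by simp), if_neg (by rintro ⟨h1, -⟩; rw [hgd] at h1; exact hx h1),
              if_neg (by rintro ⟨h1, -⟩; omega)]
          have hrun' : ∀ j, start ≤ j → j < i + 1 → ls.getD j 0 ≠ -1 := by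
            intro j hj1 hj2
            rcases Nat.lt_or_ge j i with h | h
            · exact hrun j hj1 h
            · have hji : j = i := by omega
              rw [hji, hgd]; exact hx
          rw [hstep, ih (i + 1) start ls true (by omega)
            (fun _ => ⟨by omega, hrun', by omega⟩)]
          simp

lemma sortWithTrees_eq_sortRuns (a : List Int) : sortWithTrees a = sortRuns a := by
  unfold sortWithTrees
  rw [List.range_eq_range']
  rw [loop_inv a.length 0 0 a false (by simp) (by simp)]
  simp

-- ---------- B's global sort computes sortRuns ----------

-- the (segment, value) pair list, structurally
def keyedR : List Int → Int → List (Int × Int)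
  | [], _ => []
  | x :: xs, s => if x = -1 then keyedR xs (s + 1) else (s, x) :: keyedR xs s

lemma keyedLoop_foldl (l : List Int) : ∀ (acc : List (Int × Int)) (s : Int),
    (l.foldl keyedLoop (acc, s)).1 = acc ++ keyedR l s := by
  induction l with
  | nil => intro acc s; simp [keyedR]
  | cons x xs ih =>
    intro acc s
    by_cases hx : x = -1 <;> simp [keyedLoop, keyedR, hx, ih]

-- the per-run sorted pair list ys a s (what keyed.sort() produces)
def ys : List Int → Int → List (Int × Int)
  | [], _ => []
  | x :: xs, s =>
    if x = -1 then ys xs (s + 1)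
    else
      (PySem.List.sorted ((x :: xs).takeWhile (· != -1)) (fun z => z) false).map (fun v => (s, v))
        ++ ys ((x :: xs).dropWhile (· != -1)) s
termination_by l => l.length
decreasing_by
  · simp
  · rename_i h
    have hx : (x != -1) = true := by simpa using h
    simp only [List.dropWhile_cons, hx, if_true]
    exact Nat.lt_succ_of_le (List.length_dropWhile_le _ _)

lemma ys_nil (s : Int) : ys [] s = [] := by rw [ys.eq_def]

lemma ys_cons_neg (v : List Int) (s : Int) : ys ((-1) :: v) s = ys v (s + 1) := by
  rw [ys.eq_def]; simp

lemma ys_cons (x : Int) (xs : List Int) (s : Int) (h : ¬ x = -1) :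
    ys (x :: xs) s =
      (PySem.List.sorted ((x :: xs).takeWhile (· != -1)) (fun z => z) false).map (fun v => (s, v))
        ++ ys ((x :: xs).dropWhile (· != -1)) s := by
  rw [ys.eq_def]; simp [h]

lemma keyedR_run (r : List Int) (h : ∀ x ∈ r, x ≠ -1) : ∀ (rest : List Int) (s : Int),
    keyedR (r ++ rest) s = r.map (fun v => (s, v)) ++ keyedR rest s := by
  induction r with
  | nil => intro rest s; simp
  | cons y t ih =>
    intro rest s
    have hy : ¬ y = -1 := h y (by simp)
    simp only [List.cons_append, keyedR, if_neg hy, List.map_cons]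
    rw [ih (fun x hx => h x (by simp [hx]))]

lemma takeWhile_all_ne (l : List Int) : ∀ x ∈ l.takeWhile (· != -1), x ≠ -1 := by
  intro x hx
  have := List.mem_takeWhile_imp hx
  simpa using this

-- membership bound: every segment id in ys is ≥ s
lemma ys_fst_le : ∀ (n : Nat) (l : List Int) (s : Int), l.length ≤ n →
    ∀ p ∈ ys l s, s ≤ p.1 := by
  intro n
  induction n with
  | zero =>
    intro l s hl p hp
    have : l = [] := List.eq_nil_of_length_eq_zero (by omega)
    subst this
    rw [ys_nil] at hp
    simp at hp
  | succ n ih =>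
    intro l s hl p hp
    match l with
    | [] => rw [ys_nil] at hp; simp at hp
    | x :: xs =>
      by_cases hx : x = -1
      · subst hx
        rw [ys_cons_neg] at hp
        have := ih xs (s + 1) (by simpa using hl) p hp
        omega
      · rw [ys_cons _ _ _ hx] at hp
        rcases List.mem_append.mp hp with h | h
        · obtain ⟨v, -, hv⟩ := List.mem_map.mp h
          rw [← hv]
        · have hlen : ((x :: xs).dropWhile (· != -1)).length ≤ n := by
            have hx' : (x != -1) = true := by simpa using hx
            simp only [List.dropWhile_cons, hx', if_true] at h ⊢
            have := List.length_dropWhile_le (· != -1) xs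
            simp only [List.length_cons] at hl
            omega
          exact ih _ s hlen p h

-- ys is lexicographically sorted
lemma dropWhile_shape (l : List Int) :
    List.dropWhile (· != -1) l = [] ∨ ∃ v, List.dropWhile (· != -1) l = (-1) :: v := by
  induction l with
  | nil => left; rfl
  | cons y t ih =>
    by_cases hy : y = -1
    · right; exact ⟨t, by simp [hy]⟩
    · simpa [List.dropWhile_cons, hy] using ih

-- ys is lexicographically sorted
lemma ys_pairwise : ∀ (n : Nat) (l : List Int) (s : Int), l.length ≤ n →
    (ys l s).Pairwise (fun p q : Int × Int => toLex p ≤ toLex q) := by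
  intro n
  induction n with
  | zero =>
    intro l s hl
    have : l = [] := List.eq_nil_of_length_eq_zero (by omega)
    subst this
    rw [ys_nil]
    exact List.Pairwise.nil
  | succ n ih =>
    intro l s hl
    match l with
    | [] => rw [ys_nil]; exact List.Pairwise.nil
    | x :: xs =>
      by_cases hx : x = -1
      · subst hx
        rw [ys_cons_neg]
        exact ih xs (s + 1) (by simpa using hl)
      · rw [ys_cons _ _ _ hx]
        set r := (x :: xs).takeWhile (· != -1) with hr
        set rest := (x :: xs).dropWhile (· != -1) with hrest
        have hx' : (x != -1) = true := by simpa using hx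
        have hrestlen : rest.length ≤ n := by
          simp only [hrest, List.dropWhile_cons, hx', if_true]
          have := List.length_dropWhile_le (· != -1) xs
          simp only [List.length_cons] at hl
          omega
        rw [List.pairwise_append]
        refine ⟨?_, ?_, ?_⟩
        · rw [List.pairwise_map]
          have := PySem.List.sorted_pairwise r (fun z => z)
          apply this.imp
          intro a b hab
          exact Prod.Lex.toLex_le_toLex.mpr (Or.inr ⟨rfl, hab⟩)
        · exact ih rest s hrestlen
        · intro p hp q hq
          obtain ⟨v, -, hv⟩ := List.mem_map.mp hp
          rcases dropWhile_shape (x :: xs) with h0 | ⟨v2, h0⟩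
          · rw [← hrest] at h0
            rw [h0, ys_nil] at hq
            simp at hq
          · rw [← hrest] at h0
            rw [h0, ys_cons_neg] at hq
            have hb := ys_fst_le v2.length v2 (s + 1) le_rfl q hq
            rw [← hv]
            exact le_of_lt (Prod.Lex.toLex_lt_toLex.mpr (Or.inl (by simp; omega)))

-- keyedR is a permutation of ys
lemma keyedR_perm_ys : ∀ (n : Nat) (l : List Int) (s : Int), l.length ≤ n →
    (keyedR l s).Perm (ys l s) := by
  intro n
  induction n with
  | zero =>
    intro l s hl
    have : l = [] := List.eq_nil_of_length_eq_zero (by omega)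
    subst this
    rw [ys_nil]; simp [keyedR]
  | succ n ih =>
    intro l s hl
    match l with
    | [] => rw [ys_nil]; simp [keyedR]
    | x :: xs =>
      by_cases hx : x = -1
      · subst hx
        rw [ys_cons_neg]
        simpa [keyedR] using ih xs (s + 1) (by simpa using hl)
      · rw [ys_cons _ _ _ hx]
        set r := (x :: xs).takeWhile (· != -1) with hr
        set rest := (x :: xs).dropWhile (· != -1) with hrest
        have hx' : (x != -1) = true := by simpa using hx
        have hrestlen : rest.length ≤ n := by
          simp only [hrest, List.dropWhile_cons, hx', if_true]
          have := List.length_dropWhile_le (· != -1) xs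
          simp only [List.length_cons] at hl
          omega
        have hsplit : x :: xs = r ++ rest := (List.takeWhile_append_dropWhile).symm
        rw [hsplit, keyedR_run r (takeWhile_all_ne _)]
        refine List.Perm.append ?_ (ih rest s hrestlen)
        exact List.Perm.map _ (PySem.List.sorted_perm r (fun z => z) false).symm

-- Python's tuple sort: sorted2 fst snd is sorted with the lexicographic key
lemma sorted2_eq_sortedLex (xs : List (Int × Int)) :
    PySem.List.sorted2 xs Prod.fst Prod.snd false =
      PySem.List.sorted xs (fun p => toLex p) false := by
  have hb : (fun a b : Int × Int => decide (a.1 < b.1) || (!decide (b.1 < a.1) && decide (a.2 < b.2)))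
      = (fun a b : Int × Int => decide (toLex a < toLex b)) := by
    funext a b
    by_cases h1 : a.1 < b.1 <;> by_cases h2 : b.1 < a.1 <;> by_cases h3 : a.2 < b.2 <;>
      simp [h1, h2, h3, Prod.Lex.toLex_lt_toLex] <;> omega
  show List.foldl (fun acc x => PySem.List.insertBy
      (fun a b : Int × Int => decide (a.1 < b.1) || (!decide (b.1 < a.1) && decide (a.2 < b.2))) x acc) [] xs
    = List.foldl (fun acc x => PySem.List.insertBy
      (fun a b : Int × Int => decide (toLex a < toLex b)) x acc) [] xs
  rw [hb]

lemma sortedLex_keyedR (a : List Int) (s : Int) :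
    PySem.List.sorted (keyedR a s) (fun p => toLex p) false = ys a s := by
  apply PySem.List.eq_of_perm_of_pairwise_le_of_injective (fun p : Int × Int => toLex p)
  · intro p q h; exact toLex.injective h
  · exact (PySem.List.sorted_perm _ _ _).trans (keyedR_perm_ys a.length a s le_rfl)
  · exact PySem.List.sorted_pairwise _ _
  · exact ys_pairwise a.length a s le_rfl

-- refill consumes one pair per non-(-1) element
lemma refill_run (rest : List Int) (K : List (Int × Int)) (s : Int) :
    ∀ (r q : List Int), r.length = q.length → (∀ y ∈ r, y ≠ -1) →
    refill (r ++ rest) (q.map (fun v => (s, v)) ++ K) = q ++ refill rest K := by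
  intro r
  induction r with
  | nil =>
    intro q hq _
    simp only [List.length_nil] at hq
    have : q = [] := List.eq_nil_of_length_eq_zero hq.symm
    subst this
    simp
  | cons y t ih =>
    intro q hq hall
    match q with
    | [] => simp at hq
    | w :: q' =>
      have hy : ¬ y = -1 := hall y (by simp)
      simp only [List.cons_append, List.map_cons, refill, if_neg hy]
      rw [ih q' (by simpa using hq) (fun z hz => hall z (by simp [hz]))]

lemma refill_ys : ∀ (n : Nat) (l : List Int) (s : Int), l.length ≤ n →
    refill l (ys l s) = sortRuns l := by
  intro n
  induction n with
  | zero =>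
    intro l s hl
    have : l = [] := List.eq_nil_of_length_eq_zero (by omega)
    subst this
    rw [ys_nil, sortRuns_nil]; rfl
  | succ n ih =>
    intro l s hl
    match l with
    | [] => rw [ys_nil, sortRuns_nil]; rfl
    | x :: xs =>
      by_cases hx : x = -1
      · subst hx
        rw [ys_cons_neg, sortRuns_cons_neg]
        show refill ((-1) :: xs) (ys xs (s + 1)) = (-1) :: sortRuns xs
        rw [show refill ((-1) :: xs) (ys xs (s + 1)) = (-1) :: refill xs (ys xs (s + 1)) from by
          simp [refill]]
        rw [ih xs (s + 1) (by simpa using hl)]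
      · rw [ys_cons _ _ _ hx, sortRuns_cons _ _ hx]
        set r := (x :: xs).takeWhile (· != -1) with hr
        set rest := (x :: xs).dropWhile (· != -1) with hrest
        have hx' : (x != -1) = true := by simpa using hx
        have hrestlen : rest.length ≤ n := by
          simp only [hrest, List.dropWhile_cons, hx', if_true]
          have := List.length_dropWhile_le (· != -1) xs
          simp only [List.length_cons] at hl
          omega
        have hsplit : x :: xs = r ++ rest := (List.takeWhile_append_dropWhile).symm
        conv_lhs => rw [hsplit]
        rw [refill_run rest (ys rest s) s r (PySem.List.sorted r (fun z => z) false)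
          (by rw [PySem.List.length_sorted]) (takeWhile_all_ne _)]
        rw [ih rest s hrestlen]

-- ===== VERDICT (by name: the statement is the Claim_ definition above) =====
theorem sortWithTrees_spec : Claim_equal_sortWithTrees := by
  intro a _
  show sortWithTrees a = sortWithTrees_alt a
  rw [sortWithTrees_eq_sortRuns]
  unfold sortWithTrees_alt
  rw [keyedLoop_foldl a [] 0, List.nil_append, sorted2_eq_sortedLex, sortedLex_keyedR,
    refill_ys a.length a 0 le_rfl]
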